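-- pv_equiv track=rewrite | github.com/zzdez/MidiKbdControlStudio | src/sync_manager.py | _is_in_selected_categories
-- ===== SOURCE A (Python) =====
-- from typing import Dict, List, Optional, Any
--
-- def _is_in_selected_categories(rel_path: str, categories: Optional[List[str]]) -> bool:
--     """Returns True if the file belongs to one of the selected categories."""
--     if categories is None: return True
--
--     p = rel_path.replace('\\', '/').lower()
--
--     # V9.6.23: Normalize categories to be case/accent insensitive (handles Médias vs medias)
--     norm_cats = []
--     for c in categories:
--         c_norm = c.lower().replace('é', 'e').replace('è', 'e')
--         norm_cats.append(c_norm)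
--
--     if 'medias' in norm_cats:
--         if p.startswith('medias/'): return True
--
--     if 'data' in norm_cats:
--         if p.startswith('data/'): return True
--         if p == 'config.json': return True
--
--     if 'profiles' in norm_cats:
--         if p.startswith('profiles/'): return True
--         if p.startswith('profiles - copie/'): return True
--
--     if 'devices' in norm_cats:
--         if p.startswith('devices/'): return True
--
--     if 'system' in norm_cats:
--         if p.startswith('assets/'): return True
--         if p.startswith('locales/'): return True
--         if p.endswith('.exe'): return True
--
--     # Diagnostic check removed in V9.6.39
--
--
--     return False
-- ===== SOURCE B (Python) =====
-- # Inverted algorithm: instead of scanning the selected categories and testing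
-- # the path against each category's rules, classify the PATH once into its owner
-- # categories (first path segment via one dict lookup, plus the exact-name and
-- # suffix checks), then intersect that owner set with the normalized selection.
-- _SEGMENT_OWNER = {
--     'medias': 'medias',
--     'data': 'data',
--     'profiles': 'profiles',
--     'profiles - copie': 'profiles',
--     'devices': 'devices',
--     'assets': 'system',
--     'locales': 'system',
-- }
--
--
-- def _is_in_selected_categories(rel_path, categories):
--     if categories is None:
--         return True
--     p = rel_path.replace('\\', '/').lower()
--     owners = set()
--     i = p.find('/')
--     if i != -1:
--         owner = _SEGMENT_OWNER.get(p[:i])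
--         if owner is not None:
--             owners.add(owner)
--     if p == 'config.json':
--         owners.add('data')
--     if p.endswith('.exe'):
--         owners.add('system')
--     if not owners:
--         return False
--     norm = {c.lower().replace('é', 'e').replace('è', 'e') for c in categories}
--     return not owners.isdisjoint(norm)
-- ===== Notes on version B (the rewrite author's own statement) =====
-- stated objective: alternative
-- what changed: Inverts the direction of the test: instead of scanning the selected categories and matching the path against each category's prefix/exact/suffix rules, B classifies the path once into its owner-category set (first path segment via p.find('/') and one _SEGMENT_OWNER dict lookup, plus the config.json and .exe checks) and intersects that set with the normalized selection.
import Mathlib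
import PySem

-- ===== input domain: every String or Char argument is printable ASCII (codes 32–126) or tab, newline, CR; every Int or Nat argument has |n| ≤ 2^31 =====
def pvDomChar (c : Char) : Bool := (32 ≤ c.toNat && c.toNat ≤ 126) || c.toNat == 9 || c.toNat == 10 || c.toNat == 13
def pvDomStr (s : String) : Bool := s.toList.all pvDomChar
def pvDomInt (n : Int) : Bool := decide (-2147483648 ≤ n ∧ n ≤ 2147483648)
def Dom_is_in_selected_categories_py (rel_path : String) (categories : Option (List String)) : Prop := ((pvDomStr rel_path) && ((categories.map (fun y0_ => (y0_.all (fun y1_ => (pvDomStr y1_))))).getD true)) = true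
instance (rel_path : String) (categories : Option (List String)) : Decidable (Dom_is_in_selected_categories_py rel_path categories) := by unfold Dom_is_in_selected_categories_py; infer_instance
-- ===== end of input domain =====

-- B inverts A's algorithm: instead of scanning the selected categories and testing the path
-- against each category's rules, it classifies the path once into its owner-category set
-- (first path segment via one dict lookup, plus the exact-name and suffix checks) and
-- intersects that set with the normalized selection; objective: alternative.

-- ===== PORT A =====
-- c.lower().replace('é', 'e').replace('è', 'e')  (shared category normalization, used verbatim by both Pythons)
def pvNorm (c : String) : String :=
  PySem.Str.replace (PySem.Str.replace (PySem.Str.lower c) "é" "e") "è" "e"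

def is_in_selected_categories_py (rel_path : String) (categories : Option (List String)) : Bool :=
  match categories with
  | none => true
  | some cats =>
    let p := PySem.Str.lower (PySem.Str.replace rel_path "\\" "/")
    let norm_cats := cats.foldl (fun acc c => acc ++ [pvNorm c]) []
    if norm_cats.contains "medias" && PySem.Str.startswith p "medias/" then true
    else if norm_cats.contains "data" && PySem.Str.startswith p "data/" then true
    else if norm_cats.contains "data" && p == "config.json" then true
    else if norm_cats.contains "profiles" && PySem.Str.startswith p "profiles/" then true
    else if norm_cats.contains "profiles" && PySem.Str.startswith p "profiles - copie/" then true
    else if norm_cats.contains "devices" && PySem.Str.startswith p "devices/" then true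
    else if norm_cats.contains "system" && PySem.Str.startswith p "assets/" then true
    else if norm_cats.contains "system" && PySem.Str.startswith p "locales/" then true
    else if norm_cats.contains "system" && PySem.Str.endswith p ".exe" then true
    else false

-- ===== PORT B =====
-- _SEGMENT_OWNER: first path segment -> owning category
def pvSegOwner : PySem.Dict String String :=
  PySem.Dict.ofList
  [("medias", "medias"), ("data", "data"), ("profiles", "profiles"),
   ("profiles - copie", "profiles"), ("devices", "devices"),
   ("assets", "system"), ("locales", "system")]

def is_in_selected_categories_py_alt (rel_path : String) (categories : Option (List String)) : Bool :=
  match categories with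
  | none => true
  | some cats =>
    let p := PySem.Str.lower (PySem.Str.replace rel_path "\\" "/")
    let i := PySem.Str.find p "/"
    let owners0 : PySem.Set String := PySem.Set.empty
    let owners1 :=
      if i ≠ -1 then
        match PySem.Dict.get? pvSegOwner (PySem.Str.slice p none (some i)) with
        | some owner => PySem.Set.add owners0 owner
        | none => owners0
      else owners0
    let owners2 := if p == "config.json" then PySem.Set.add owners1 "data" else owners1
    let owners3 := if PySem.Str.endswith p ".exe" then PySem.Set.add owners2 "system" else owners2
    if owners3.isEmpty then false
    else
      let norm := PySem.Set.ofList (cats.map pvNorm)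
      !(PySem.Set.isdisjoint owners3 norm)

-- ===== PRECONDITION & SPEC =====
def Spec_is_in_selected_categories_py (rel_path : String) (categories : Option (List String)) (out : Bool) : Prop := out = is_in_selected_categories_py_alt rel_path categories
instance (rel_path : String) (categories : Option (List String)) (out : Bool) : Decidable (Spec_is_in_selected_categories_py rel_path categories out) := by unfold Spec_is_in_selected_categories_py; infer_instance

-- ===== CLAIM (what is proved, stated in full; the proofs are below) =====
def Claim_equal_is_in_selected_categories_py : Prop := ∀ (rel_path : String) (categories : Option (List String)), Dom_is_in_selected_categories_py rel_path categories → Spec_is_in_selected_categories_py rel_path categories (is_in_selected_categories_py rel_path categories)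

-- ===== LEMMAS AND PROOFS =====

lemma pv_if_or (b x : Bool) : (if b then true else x) = (b || x) := by cases b <;> simp

lemma pv_singleton_prefix_iff (c : Char) (M : List Char) : [c] <+: M ↔ M.head? = some c := by
  cases M with
  | nil => simp
  | cons a t =>
    constructor
    · rintro ⟨r, hr⟩; simp at hr; simp [hr.1]
    · intro h; simp at h; exact ⟨t, by simp [h]⟩

-- the path starts with 'x/' iff '/' occurs in it and the part before the first '/' is x
lemma pv_seg_prefix_iff (x : List Char) (hx : ('/' : Char) ∉ x) (L : List Char) :
    (x ++ ['/']) <+: L ↔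
      (PySem.Chars.find L ['/'] ≠ -1 ∧
       L.take (PySem.Chars.find L ['/']).toNat = x) := by
  constructor
  · rintro ⟨t, ht⟩
    have hL : L = x ++ '/' :: t := by rw [← ht]; simp
    have hinf : [('/' : Char)] <:+: L := ⟨x, t, by simp [hL]⟩
    have hne : PySem.Chars.find L ['/'] ≠ -1 :=
      (PySem.Chars.find_ne_neg_one_iff L ['/']).mpr hinf
    have hnn : 0 ≤ PySem.Chars.find L ['/'] :=
      (PySem.Chars.find_nonneg_iff L ['/']).mpr hinf
    obtain ⟨h1, h2⟩ := PySem.Chars.find_spec (s := L) (sub := ['/']) hnn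
    set f := (PySem.Chars.find L ['/']).toNat with hf
    have hfeq : f = x.length := by
      rcases lt_trichotomy f x.length with hlt | heq | hgt
      · exfalso
        have hsome : L[f]? = some '/' := by
          have := (pv_singleton_prefix_iff '/' (L.drop f)).mp h1
          simpa [List.head?_drop] using this
        have hx' : L[f]? = x[f]? := by
          rw [hL]; exact List.getElem?_append_left hlt
        exact hx (List.mem_of_getElem? (hx' ▸ hsome))
      · exact heq
      · exact absurd (by rw [hL, List.drop_left]; exact ⟨t, rfl⟩) (h2 x.length hgt)
    refine ⟨hne, ?_⟩
    rw [hfeq, hL, List.take_left]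
  · rintro ⟨hne, htake⟩
    have hnn : 0 ≤ PySem.Chars.find L ['/'] := by
      have := PySem.Chars.neg_one_le_find L ['/']
      omega
    obtain ⟨h1, -⟩ := PySem.Chars.find_spec (s := L) (sub := ['/']) hnn
    set f := (PySem.Chars.find L ['/']).toNat with hf
    have hhd : (L.drop f).head? = some '/' := (pv_singleton_prefix_iff '/' (L.drop f)).mp h1
    obtain ⟨t, ht⟩ : ∃ t, L.drop f = '/' :: t := by
      cases h : L.drop f with
      | nil => rw [h] at hhd; simp at hhd
      | cons a t => rw [h] at hhd; simp at hhd; exact ⟨t, by simp [hhd]⟩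
    refine ⟨t, ?_⟩
    calc (x ++ ['/']) ++ t = x ++ '/' :: t := by simp
      _ = L.take f ++ L.drop f := by rw [htake, ht]
      _ = L := List.take_append_drop f L

-- the _SEGMENT_OWNER lookup written out
lemma pv_segOwner_get (h : String) :
    PySem.Dict.get? pvSegOwner h =
      (if h = "medias" then some "medias" else if h = "data" then some "data"
       else if h = "profiles" then some "profiles"
       else if h = "profiles - copie" then some "profiles"
       else if h = "devices" then some "devices"
       else if h = "assets" then some "system"
       else if h = "locales" then some "system" else none) := by
  by_cases h1 : h = "medias"; · subst h1; decide
  by_cases h2 : h = "data"; · subst h2; decide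
  by_cases h3 : h = "profiles"; · subst h3; decide
  by_cases h4 : h = "profiles - copie"; · subst h4; decide
  by_cases h5 : h = "devices"; · subst h5; decide
  by_cases h6 : h = "assets"; · subst h6; decide
  by_cases h7 : h = "locales"; · subst h7; decide
  · have f1 : (("medias" : String) == h) = false := beq_eq_false_iff_ne.mpr (Ne.symm h1)
    have f2 : (("data" : String) == h) = false := beq_eq_false_iff_ne.mpr (Ne.symm h2)
    have f3 : (("profiles" : String) == h) = false := beq_eq_false_iff_ne.mpr (Ne.symm h3)
    have f4 : (("profiles - copie" : String) == h) = false := beq_eq_false_iff_ne.mpr (Ne.symm h4)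
    have f5 : (("devices" : String) == h) = false := beq_eq_false_iff_ne.mpr (Ne.symm h5)
    have f6 : (("assets" : String) == h) = false := beq_eq_false_iff_ne.mpr (Ne.symm h6)
    have f7 : (("locales" : String) == h) = false := beq_eq_false_iff_ne.mpr (Ne.symm h7)
    have e : PySem.Dict.get? pvSegOwner h = none := by
      rw [show pvSegOwner = PySem.Dict.mk pvSegOwner.items from rfl, show pvSegOwner.items =
        [("medias", "medias"), ("data", "data"), ("profiles", "profiles"),
         ("profiles - copie", "profiles"), ("devices", "devices"),
         ("assets", "system"), ("locales", "system")] from by decide]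
      simp [PySem.Dict.get?, f1, f2, f3, f4, f5, f6, f7]
    simp [e, h1, h2, h3, h4, h5, h6, h7]

lemma pv_sw_iff (x xs p : String) (hxs : xs.toList = x.toList ++ ['/'])
    (hx : ('/' : Char) ∉ x.toList) :
    PySem.Str.startswith p xs = true ↔
      (PySem.Str.find p "/" ≠ -1 ∧
       PySem.Str.slice p none (some (PySem.Str.find p "/")) = x) := by
  have hfind : PySem.Str.find p "/" = PySem.Chars.find p.toList ['/'] := by
    simp [PySem.Str.find_eq]
  rw [show PySem.Str.startswith p xs = PySem.Chars.startswith p.toList xs.toList from by simp,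
    PySem.Chars.startswith_iff, hxs, pv_seg_prefix_iff _ hx, hfind]
  constructor
  · rintro ⟨hne, htake⟩
    refine ⟨hne, ?_⟩
    rw [← String.toList_inj, PySem.Str.toList_slice, PySem.Chars.slice_eq_listSlice,
      PySem.List.slice_to _ (by have := PySem.Chars.neg_one_le_find p.toList ['/']; omega), htake]
  · rintro ⟨hne, hsl⟩
    refine ⟨hne, ?_⟩
    rw [← String.toList_inj, PySem.Str.toList_slice, PySem.Chars.slice_eq_listSlice,
      PySem.List.slice_to _ (by have := PySem.Chars.neg_one_le_find p.toList ['/']; omega)] at hsl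
    exact hsl

-- ===== VERDICT (by name: the statement is the Claim_ definition above) =====
set_option maxHeartbeats 1000000 in
theorem is_in_selected_categories_py_spec : Claim_equal_is_in_selected_categories_py := by
  intro rel_path categories _
  unfold Spec_is_in_selected_categories_py is_in_selected_categories_py is_in_selected_categories_py_alt
  cases categories with
  | none => rfl
  | some cats =>
    simp only [PySem.List.foldl_append_singleton_eq_map, pv_if_or, Bool.or_false]
    rw [Bool.eq_iff_iff]
    generalize PySem.Str.lower (PySem.Str.replace rel_path "\\" "/") = p
    set i := PySem.Str.find p "/" with hi
    set hd := PySem.Str.slice p none (some i) with hhd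
    set w1 : PySem.Set String := (if i ≠ -1 then
        match pvSegOwner.get? hd with
        | some owner => PySem.Set.empty.add owner
        | none => PySem.Set.empty
      else PySem.Set.empty) with hw1
    set w2 : PySem.Set String := (if (p == "config.json") = true then w1.add "data" else w1) with hw2
    set w3 : PySem.Set String := (if PySem.Str.endswith p ".exe" = true then w2.add "system" else w2) with hw3
    have hm1 : ∀ o : String, o ∈ w1 ↔ (i ≠ -1 ∧ pvSegOwner.get? hd = some o) := by
      intro o
      rw [hw1]
      by_cases hc : i ≠ -1
      · cases hg : pvSegOwner.get? hd with
        | none => simp [hc, hg, PySem.Set.empty]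
        | some owner => simp [hc, hg, PySem.Set.mem_add, PySem.Set.empty, eq_comm]
      · simp [hc, PySem.Set.empty]
    have hm3 : ∀ o : String, o ∈ w3 ↔
        ((i ≠ -1 ∧ pvSegOwner.get? hd = some o) ∨ ((p == "config.json") = true ∧ o = "data") ∨
         (PySem.Str.endswith p ".exe" = true ∧ o = "system")) := by
      intro o
      rw [hw3, hw2]
      by_cases he : PySem.Str.endswith p ".exe" = true <;>
        by_cases hcj : (p == "config.json") = true <;>
          simp only [he, hcj, if_true, if_false, ite_true, ite_false, not_false_iff,
            Bool.false_eq_true, ite_self] <;>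
          simp [PySem.Set.mem_add, hm1] <;> tauto
    have hB : (if w3.isEmpty = true then false
        else !(w3.isdisjoint (PySem.Set.ofList (cats.map pvNorm)))) = true ↔
        ∃ o ∈ w3, o ∈ cats.map pvNorm := by
      by_cases hemp : w3.isEmpty = true
      · simp [hemp]
        intro o ho
        rw [List.isEmpty_iff] at hemp
        simp [hemp] at ho
      · rw [if_neg hemp]
        simp only [Bool.not_eq_true']
        rw [← Bool.not_eq_true, PySem.Set.isdisjoint_iff]
        push_neg
        constructor
        · rintro ⟨o, ho, hn⟩
          exact ⟨o, ho, (PySem.Set.mem_ofList _ _).mp hn⟩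
        · rintro ⟨o, ho, hn⟩
          exact ⟨o, ho, (PySem.Set.mem_ofList _ _).mpr hn⟩
    rw [hB]
    simp only [List.nil_append, Bool.or_eq_true, Bool.and_eq_true, List.contains_iff_mem,
      pv_sw_iff "medias" "medias/" p (by decide) (by decide),
      pv_sw_iff "data" "data/" p (by decide) (by decide),
      pv_sw_iff "profiles" "profiles/" p (by decide) (by decide),
      pv_sw_iff "profiles - copie" "profiles - copie/" p (by decide) (by decide),
      pv_sw_iff "devices" "devices/" p (by decide) (by decide),
      pv_sw_iff "assets" "assets/" p (by decide) (by decide),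
      pv_sw_iff "locales" "locales/" p (by decide) (by decide)]
    have mkw : ∀ (k o : String), PySem.Str.find p "/" ≠ -1 →
        PySem.Str.slice p none (some (PySem.Str.find p "/")) = k →
        pvSegOwner.get? k = some o → o ∈ w3 := by
      intro k o hne hs hg
      refine (hm3 o).mpr (Or.inl ⟨by rw [hi]; exact hne, ?_⟩)
      have hk : hd = k := by rw [hhd, hi]; exact hs
      rw [hk]; exact hg
    constructor
    · rintro (⟨hc, hne, hs⟩ | ⟨hc, hne, hs⟩ | ⟨hc, hcj⟩ | ⟨hc, hne, hs⟩ | ⟨hc, hne, hs⟩ |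
        ⟨hc, hne, hs⟩ | ⟨hc, hne, hs⟩ | ⟨hc, hne, hs⟩ | ⟨hc, hex⟩)
      · exact ⟨"medias", mkw _ _ hne hs (by decide), hc⟩
      · exact ⟨"data", mkw _ _ hne hs (by decide), hc⟩
      · exact ⟨"data", (hm3 _).mpr (Or.inr (Or.inl ⟨hcj, rfl⟩)), hc⟩
      · exact ⟨"profiles", mkw _ _ hne hs (by decide), hc⟩
      · exact ⟨"profiles", mkw _ _ hne hs (by decide), hc⟩
      · exact ⟨"devices", mkw _ _ hne hs (by decide), hc⟩
      · exact ⟨"system", mkw _ _ hne hs (by decide), hc⟩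
      · exact ⟨"system", mkw _ _ hne hs (by decide), hc⟩
      · exact ⟨"system", (hm3 _).mpr (Or.inr (Or.inr ⟨hex, rfl⟩)), hc⟩
    · rintro ⟨o, how3, homem⟩
      rcases (hm3 o).mp how3 with ⟨hne, hget⟩ | ⟨hcj, rfl⟩ | ⟨hex, rfl⟩
      · have hne' : PySem.Str.find p "/" ≠ -1 := by rw [← hi]; exact hne
        rw [pv_segOwner_get hd] at hget
        split_ifs at hget with g1 g2 g3 g4 g5 g6 g7
        · injection hget with h; subst h
          exact Or.inl ⟨homem, hne', by rw [hhd, hi] at g1; exact g1⟩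
        · injection hget with h; subst h
          exact Or.inr (Or.inl ⟨homem, hne', by rw [hhd, hi] at g2; exact g2⟩)
        · injection hget with h; subst h
          exact Or.inr (Or.inr (Or.inr (Or.inl ⟨homem, hne', by rw [hhd, hi] at g3; exact g3⟩)))
        · injection hget with h; subst h
          exact Or.inr (Or.inr (Or.inr (Or.inr (Or.inl ⟨homem, hne', by rw [hhd, hi] at g4; exact g4⟩))))
        · injection hget with h; subst h
          exact Or.inr (Or.inr (Or.inr (Or.inr (Or.inr (Or.inl ⟨homem, hne', by rw [hhd, hi] at g5; exact g5⟩)))))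
        · injection hget with h; subst h
          exact Or.inr (Or.inr (Or.inr (Or.inr (Or.inr (Or.inr (Or.inl ⟨homem, hne', by rw [hhd, hi] at g6; exact g6⟩))))))
        · injection hget with h; subst h
          exact Or.inr (Or.inr (Or.inr (Or.inr (Or.inr (Or.inr (Or.inr (Or.inl ⟨homem, hne', by rw [hhd, hi] at g7; exact g7⟩)))))))
      · exact Or.inr (Or.inr (Or.inl ⟨homem, hcj⟩))
      · exact Or.inr (Or.inr (Or.inr (Or.inr (Or.inr (Or.inr (Or.inr (Or.inr ⟨homem, hex⟩)))))))
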